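-- pv_equiv track=rewrite | github.com/ansipunk/punquote | punquote/handlers/quote.py | _parse_command_arguments
-- ===== SOURCE A (Python) =====
-- import contextlib
--
-- def _parse_command_arguments(command: str) -> tuple[int, bool, bool]:
--     preserve_replies = False
--     preserve_media = False
--     message_count = 0
--
--     arguments = command.split(" ")
--
--     for argument in arguments:
--         if argument == "r":
--             preserve_replies = True
--         elif argument == "m":
--             preserve_media = True
--         else:
--             with contextlib.suppress(ValueError):
--                 message_count = int(argument)
--
--     return message_count, preserve_replies, preserve_media
-- ===== SOURCE B (Python) =====
-- def _parse_command_arguments(command: str) -> tuple[int, bool, bool]: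
--     tokens = command.split(" ")
--     token_set = set(tokens)
--
--     message_count = 0
--     for token in reversed(tokens):
--         try:
--             message_count = int(token)
--             break
--         except ValueError:
--             continue
--
--     return message_count, "r" in token_set, "m" in token_set
-- ===== Notes on version B (the rewrite author's own statement) =====
-- stated objective: alternative
-- what changed: Instead of A's single forward stateful loop, B scans the tokens in REVERSE and stops at the first int-parsable one (last-int-wins by early exit), and reads the two flags from a set of tokens built once.
import Mathlib
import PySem

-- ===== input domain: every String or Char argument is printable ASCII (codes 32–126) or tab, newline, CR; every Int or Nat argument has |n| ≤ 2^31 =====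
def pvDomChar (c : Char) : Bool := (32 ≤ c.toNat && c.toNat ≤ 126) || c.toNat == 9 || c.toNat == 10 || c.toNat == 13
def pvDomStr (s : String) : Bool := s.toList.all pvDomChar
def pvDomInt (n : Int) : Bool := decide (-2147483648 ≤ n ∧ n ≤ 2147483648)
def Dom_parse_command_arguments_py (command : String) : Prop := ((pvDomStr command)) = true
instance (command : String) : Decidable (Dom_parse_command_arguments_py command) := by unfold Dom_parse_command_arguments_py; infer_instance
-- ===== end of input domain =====

-- B scans the tokens in reverse and stops at the first int-parsable one (last-int-wins
-- by early exit), reading the flags from a set of tokens, instead of A's forward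
-- stateful loop (alternative decomposition, same cost).

-- ===== PORT A =====
def parse_command_arguments_py (command : String) : Int × Bool × Bool :=
  let arguments := (PySem.Chars.splitOn command.toList " ".toList).map String.ofList
  arguments.foldl (fun (s : Int × Bool × Bool) argument =>
    if argument = "r" then (s.1, true, s.2.2)
    else if argument = "m" then (s.1, s.2.1, true)
    else match PySem.Int.ofStr? argument with
      | some n => (n, s.2.1, s.2.2)
      | none => s) (0, false, false)

-- ===== PORT B =====
-- early-exit scan: first token whose int() succeeds (Source B's `for … break` loop)
def pcaFirstInt? : List String → Option Int
  | [] => none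
  | a :: t => match PySem.Int.ofStr? a with
    | some n => some n
    | none => pcaFirstInt? t

def parse_command_arguments_py_alt (command : String) : Int × Bool × Bool :=
  let tokens := (PySem.Chars.splitOn command.toList " ".toList).map String.ofList
  let tokenSet := PySem.Set.ofList tokens
  let message_count := (pcaFirstInt? tokens.reverse).getD 0
  (message_count, tokenSet.contains "r", tokenSet.contains "m")

-- ===== PRECONDITION & SPEC =====
def Spec_parse_command_arguments_py (command : String) (out : Int × Bool × Bool) : Prop := out = parse_command_arguments_py_alt command
instance (command : String) (out : Int × Bool × Bool) : Decidable (Spec_parse_command_arguments_py command out) := by unfold Spec_parse_command_arguments_py; infer_instance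

-- ===== CLAIM (what is proved, stated in full; the proofs are below) =====
def Claim_equal_parse_command_arguments_py : Prop := ∀ (command : String), Dom_parse_command_arguments_py command → Spec_parse_command_arguments_py command (parse_command_arguments_py command)

-- ===== LEMMAS AND PROOFS =====

theorem ofStr?_r : PySem.Int.ofStr? "r" = none := by decide

theorem ofStr?_m : PySem.Int.ofStr? "m" = none := by decide

theorem pcaFirstInt?_append (xs : List String) (a : String) :
    pcaFirstInt? (xs ++ [a]) =
      match pcaFirstInt? xs with
      | some n => some n
      | none => PySem.Int.ofStr? a := by
  induction xs with
  | nil => cases h : PySem.Int.ofStr? a <;> simp [pcaFirstInt?, h]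
  | cons b t ih =>
    simp only [List.cons_append, pcaFirstInt?]
    cases PySem.Int.ofStr? b <;> simp [ih]

-- the last-int-wins fold equals the reversed early-exit scan
theorem fold_eq_reverse (l : List String) (c : Int) :
    l.foldl (fun acc a => (PySem.Int.ofStr? a).getD acc) c
      = (pcaFirstInt? l.reverse).getD c := by
  induction l generalizing c with
  | nil => simp [pcaFirstInt?]
  | cons a t ih =>
    simp only [List.foldl_cons, List.reverse_cons, ih, pcaFirstInt?_append]
    cases h : pcaFirstInt? t.reverse <;> cases h2 : PySem.Int.ofStr? a <;> simp [h2]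

theorem mem_set_contains (l : List String) (s : String) :
    (PySem.Set.ofList l).contains s = l.contains s := by
  simp [PySem.Set.contains, List.contains_eq_mem, PySem.Set.mem_ofList]

-- A's fold equals the three independent computations, for any start state.
theorem fold_eq (l : List String) (c : Int) (pr pm : Bool) :
    l.foldl (fun (s : Int × Bool × Bool) argument =>
      if argument = "r" then (s.1, true, s.2.2)
      else if argument = "m" then (s.1, s.2.1, true)
      else match PySem.Int.ofStr? argument with
        | some n => (n, s.2.1, s.2.2)
        | none => s) (c, pr, pm)
    = (l.foldl (fun acc a => (PySem.Int.ofStr? a).getD acc) c,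
       pr || l.contains "r", pm || l.contains "m") := by
  induction l generalizing c pr pm with
  | nil => simp
  | cons a t ih =>
    by_cases hr : a = "r"
    · subst hr
      simp [List.foldl_cons, ofStr?_r, ih]
    · by_cases hm : a = "m"
      · subst hm
        simp [List.foldl_cons, ofStr?_m, ih]
      · cases h : PySem.Int.ofStr? a with
        | none => simp [List.foldl_cons, hr, hm, Ne.symm hr, Ne.symm hm, h, ih]
        | some n => simp [List.foldl_cons, hr, hm, Ne.symm hr, Ne.symm hm, h, ih]

-- ===== VERDICT (by name: the statement is the Claim_ definition above) =====
theorem parse_command_arguments_py_spec : Claim_equal_parse_command_arguments_py := by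
  intro command _
  unfold Spec_parse_command_arguments_py parse_command_arguments_py parse_command_arguments_py_alt
  simp only [fold_eq, fold_eq_reverse, mem_set_contains, Bool.false_or]
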